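-- pv_equiv track=rewrite | github.com/2208se/Diabetes-detection | from aima.py | infer_animal
-- ===== SOURCE A (Python) =====
-- classifications = {
--     'cheetah', 'tiger', 'giraffe', 'zebra', 'ostrich',
--     'penguin', 'albatross', 'mammal', 'bird', 'carnivore',
--     'ungulate', 'unknown'
-- }
--
-- rules = [
--     ({'mammal', 'carnivore', 'has_tawny_color', 'has_dark_spots'}, 'cheetah'),
--     ({'mammal', 'carnivore', 'has_tawny_color', 'has_black_stripes'}, 'tiger'),
--     ({'ungulate', 'has_long_neck', 'has_long_legs'}, 'giraffe'),
--     ({'ungulate', 'has_black_stripes'}, 'zebra'),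
--     ({'bird', 'does_not_fly', 'has_long_neck'}, 'ostrich'),
--     ({'bird', 'does_not_fly', 'swims', 'is_black_and_white'}, 'penguin'),
--     ({'bird', 'appears_in_story_Ancient_Mariner', 'flys_well'}, 'albatross')
-- ]
--
-- def infer_animal(attributes):
--     inferred = set()
--     while True:
--         new_inferences = False
--         for rule in rules:
--             antecedent, consequent = rule
--             if all(attr in attributes or attr in inferred for attr in antecedent) and consequent not in inferred:
--                 inferred.add(consequent)
--                 new_inferences = True
--         if not new_inferences:
--             break
--     possible_animals = inferred.intersection(classifications)
--     if possible_animals: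
--         return possible_animals.pop()
--     else:
--         return 'unknown'
-- ===== SOURCE B (Python) =====
-- rules = [
--     (('mammal', 'carnivore', 'has_tawny_color', 'has_dark_spots'), 'cheetah'),
--     (('mammal', 'carnivore', 'has_tawny_color', 'has_black_stripes'), 'tiger'),
--     (('ungulate', 'has_long_neck', 'has_long_legs'), 'giraffe'),
--     (('ungulate', 'has_black_stripes'), 'zebra'),
--     (('bird', 'does_not_fly', 'has_long_neck'), 'ostrich'),
--     (('bird', 'does_not_fly', 'swims', 'is_black_and_white'), 'penguin'),
--     (('bird', 'appears_in_story_Ancient_Mariner', 'flys_well'), 'albatross')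
-- ]
--
--
-- def _satisfied(antecedent, attributes):
--     return all(attr in attributes for attr in antecedent)
--
--
-- def infer_animal(attributes):
--     # No rule's consequent occurs in any antecedent, so forward chaining can
--     # never enable a rule that the given attributes alone do not enable:
--     # a single first-match scan over the rules suffices.
--     for antecedent, consequent in rules:
--         if _satisfied(antecedent, attributes):
--             return consequent
--     return 'unknown'
-- ===== Notes on version B (the rewrite author's own statement) =====
-- stated objective: simpler
-- what changed: Replaced the iterate-to-convergence forward-chaining loop with a mutable inferred set, set intersection and set.pop() by a single first-match scan over the rule list, which is valid because no rule's consequent occurs in any antecedent.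
import Mathlib
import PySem

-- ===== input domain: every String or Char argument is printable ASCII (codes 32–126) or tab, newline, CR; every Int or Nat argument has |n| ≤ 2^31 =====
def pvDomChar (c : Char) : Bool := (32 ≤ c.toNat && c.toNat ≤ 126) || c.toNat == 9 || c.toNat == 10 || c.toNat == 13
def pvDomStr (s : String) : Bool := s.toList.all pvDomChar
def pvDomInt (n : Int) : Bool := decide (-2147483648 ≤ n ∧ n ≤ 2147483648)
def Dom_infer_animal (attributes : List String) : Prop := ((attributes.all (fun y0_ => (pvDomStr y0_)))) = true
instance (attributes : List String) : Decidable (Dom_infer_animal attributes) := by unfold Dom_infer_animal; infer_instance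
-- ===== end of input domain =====

-- B replaces A's iterate-to-convergence forward-chaining loop (inferred set, intersection, set.pop)
-- by a single first-match scan over the rules (simpler); valid since no consequent occurs in any antecedent.


-- shared module constants (the Python module's `rules` and `classifications`)
def pvRules : List (List String × String) :=
  [ (["mammal", "carnivore", "has_tawny_color", "has_dark_spots"], "cheetah"),
    (["mammal", "carnivore", "has_tawny_color", "has_black_stripes"], "tiger"),
    (["ungulate", "has_long_neck", "has_long_legs"], "giraffe"),
    (["ungulate", "has_black_stripes"], "zebra"),
    (["bird", "does_not_fly", "has_long_neck"], "ostrich"),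
    (["bird", "does_not_fly", "swims", "is_black_and_white"], "penguin"),
    (["bird", "appears_in_story_Ancient_Mariner", "flys_well"], "albatross") ]

def pvClassifications : PySem.Set String :=
  PySem.Set.ofList ["cheetah", "tiger", "giraffe", "zebra", "ostrich",
    "penguin", "albatross", "mammal", "bird", "carnivore", "ungulate", "unknown"]

-- ===== PORT A =====
-- one rule step of the inner `for rule in rules:` body
def pvStepA (attributes : List String) (st : PySem.Set String × Bool)
    (rule : List String × String) : PySem.Set String × Bool :=
  if rule.1.all (fun attr => attributes.contains attr || PySem.Set.contains st.1 attr)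
      && !(PySem.Set.contains st.1 rule.2) then
    (PySem.Set.add st.1 rule.2, true)
  else st

-- the `while True:` loop; fuel 8 is exact: every pass either adds one of the 7 distinct
-- consequents to `inferred` or sets new_inferences = False and breaks, so the loop
-- always terminates within 8 passes.
def pvLoopA (attributes : List String) : Nat → PySem.Set String → PySem.Set String
  | 0, inferred => inferred
  | fuel + 1, inferred =>
    let st := pvRules.foldl (pvStepA attributes) (inferred, false)
    if st.2 then pvLoopA attributes fuel st.1 else st.1

def infer_animal (attributes : List String) : String :=
  let inferred := pvLoopA attributes 8 PySem.Set.empty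
  let possible_animals := PySem.Set.inter inferred pvClassifications
  -- set.pop(): an arbitrary element; ported as the first element, exact on Pre_
  -- (there `possible_animals` has at most one element)
  match possible_animals with
  | [] => "unknown"
  | x :: _ => x

-- ===== PORT B =====
def pvSatisfied (antecedent : List String) (attributes : List String) : Bool :=
  antecedent.all (fun attr => attributes.contains attr)

-- Source B: first-match scan over rules with early return
def pvScanB (attributes : List String) : List (List String × String) → String
  | [] => "unknown"
  | rule :: rest =>
    if pvSatisfied rule.1 attributes then rule.2 else pvScanB attributes rest

def infer_animal_alt (attributes : List String) : String :=
  pvScanB attributes pvRules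

-- ===== PRECONDITION & SPEC =====
-- Pre_ excludes inputs that satisfy the antecedents of two or more rules: there A's answer is
-- an arbitrary hash-order set.pop() tie-break (it varies with the interpreter's hash seed),
-- which no implementation should be required to match; B returns the first firing rule's animal.
def Pre_infer_animal (attributes : List String) : Prop :=
  (pvRules.countP (fun rule => pvSatisfied rule.1 attributes)) ≤ 1
instance (attributes : List String) : Decidable (Pre_infer_animal attributes) := by
  unfold Pre_infer_animal; infer_instance
def pvWitness_infer_animal : List String := ["bird", "does_not_fly", "has_long_neck"]

def Spec_infer_animal (attributes : List String) (out : String) : Prop := out = infer_animal_alt attributes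
instance (attributes : List String) (out : String) : Decidable (Spec_infer_animal attributes out) := by unfold Spec_infer_animal; infer_instance

-- ===== CLAIM (what is proved, stated in full; the proofs are below) =====
def Claim_equal_infer_animal : Prop := ∀ (attributes : List String), Dom_infer_animal attributes → Pre_infer_animal attributes → Spec_infer_animal attributes (infer_animal attributes)

-- ===== LEMMAS AND PROOFS =====

-- proof-side helpers (used only by the lemmas below)
def pvAnimals : List String :=
  ["cheetah", "tiger", "giraffe", "zebra", "ostrich", "penguin", "albatross"]

-- A's rule step with the (provably redundant) `attr in inferred` test removed
def pvStep' (attributes : List String) (st : PySem.Set String × Bool)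
    (rule : List String × String) : PySem.Set String × Bool :=
  if pvSatisfied rule.1 attributes && !(PySem.Set.contains st.1 rule.2) then
    (PySem.Set.add st.1 rule.2, true)
  else st

theorem pvRules_ok : ∀ r ∈ pvRules, (∀ a ∈ r.1, a ∉ pvAnimals) ∧ r.2 ∈ pvAnimals := by
  decide

theorem pvRules_cls : ∀ r ∈ pvRules, PySem.Set.contains pvClassifications r.2 = true := by
  decide

theorem pv_all_or (attributes inferred : List String) (ant : List String)
    (h : ∀ a ∈ ant, PySem.Set.contains inferred a = false) :
    (ant.all fun a => attributes.contains a || PySem.Set.contains inferred a)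
      = pvSatisfied ant attributes := by
  unfold pvSatisfied
  induction ant with
  | nil => rfl
  | cons a t ih =>
    simp only [List.all_cons]
    rw [h a (List.mem_cons_self), ih (fun b hb => h b (List.mem_cons_of_mem a hb))]
    simp

theorem pv_contains_false {s : List String} {a : String} (h : a ∉ s) :
    PySem.Set.contains s a = false := by
  simp [PySem.Set.contains_eq_listContains, h]

theorem pv_stepA_eq (attributes : List String) (st : PySem.Set String × Bool)
    (r : List String × String) (hr : ∀ a ∈ r.1, a ∉ pvAnimals)
    (hst : ∀ x ∈ st.1, x ∈ pvAnimals) :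
    pvStepA attributes st r = pvStep' attributes st r := by
  unfold pvStepA pvStep'
  rw [pv_all_or]
  intro a ha
  exact pv_contains_false (fun hm => hr a ha (hst a hm))

theorem pv_inv_step' (attributes : List String) (st : PySem.Set String × Bool)
    (r : List String × String) (hst : ∀ x ∈ st.1, x ∈ pvAnimals) (hr2 : r.2 ∈ pvAnimals) :
    ∀ x ∈ (pvStep' attributes st r).1, x ∈ pvAnimals := by
  unfold pvStep'
  split
  · intro x hx
    rcases (PySem.Set.mem_add _ _ _).1 hx with h | h
    · exact hst x h
    · exact h ▸ hr2
  · exact hst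

theorem pv_pass_eq (attributes : List String) :
    ∀ (rs : List (List String × String)) (st : PySem.Set String × Bool),
      (∀ r ∈ rs, (∀ a ∈ r.1, a ∉ pvAnimals) ∧ r.2 ∈ pvAnimals) →
      (∀ x ∈ st.1, x ∈ pvAnimals) →
      rs.foldl (pvStepA attributes) st = rs.foldl (pvStep' attributes) st := by
  intro rs
  induction rs with
  | nil => intro st _ _; rfl
  | cons r t ih =>
    intro st hrs hst
    simp only [List.foldl_cons]
    rw [pv_stepA_eq attributes st r (hrs r List.mem_cons_self).1 hst]
    exact ih _ (fun r' h' => hrs r' (List.mem_cons_of_mem r h'))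
      (pv_inv_step' attributes st r hst (hrs r List.mem_cons_self).2)

theorem pv_no_fire (attributes : List String) :
    ∀ (rs : List (List String × String)) (st : PySem.Set String × Bool),
      (∀ r ∈ rs, pvSatisfied r.1 attributes = false ∨ PySem.Set.contains st.1 r.2 = true) →
      rs.foldl (pvStep' attributes) st = st := by
  intro rs
  induction rs with
  | nil => intro st _; rfl
  | cons r t ih =>
    intro st h
    simp only [List.foldl_cons]
    have hstep : pvStep' attributes st r = st := by
      unfold pvStep'
      rcases h r List.mem_cons_self with hf | hc
      · rw [hf]; simp
      · rw [hc]; simp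
    rw [hstep]
    exact ih st (fun r' h' => h r' (List.mem_cons_of_mem r h'))

theorem pv_find_unique (attributes : List String) :
    ∀ (rs : List (List String × String)) (r₀ : List String × String),
      rs.countP (fun r => pvSatisfied r.1 attributes) ≤ 1 →
      rs.find? (fun r => pvSatisfied r.1 attributes) = some r₀ →
      ∀ r ∈ rs, pvSatisfied r.1 attributes = true → r = r₀ := by
  intro rs
  induction rs with
  | nil => intro r₀ _ h; simp at h
  | cons a t ih =>
    intro r₀ hcount hfind r hr hfires
    by_cases ha : pvSatisfied a.1 attributes = true
    · simp only [List.find?_cons, ha] at hfind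
      have hzero : t.countP (fun r => pvSatisfied r.1 attributes) = 0 := by
        rw [List.countP_cons] at hcount; simp only [ha] at hcount; rw [if_pos trivial] at hcount; omega
      rcases List.mem_cons.1 hr with h | h
      · rw [h]; exact Option.some.inj hfind
      · exact absurd hfires (by simpa using (List.countP_eq_zero.1 hzero) r h)
    · simp only [List.find?_cons, (show pvSatisfied a.1 attributes = false by simpa using ha)] at hfind
      rcases List.mem_cons.1 hr with h | h
      · exact absurd (h ▸ hfires) ha
      · exact ih r₀ (by rw [List.countP_cons] at hcount; simp only [ha] at hcount; rw [if_neg (by simp)] at hcount; omega) hfind r h hfires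

theorem pv_one_fire (attributes : List String) :
    ∀ (rs : List (List String × String)) (r₀ : List String × String),
      rs.countP (fun r => pvSatisfied r.1 attributes) ≤ 1 →
      rs.find? (fun r => pvSatisfied r.1 attributes) = some r₀ →
      rs.foldl (pvStep' attributes) ([], false) = ([r₀.2], true) := by
  intro rs
  induction rs with
  | nil => intro r₀ _ h; simp at h
  | cons a t ih =>
    intro r₀ hcount hfind
    by_cases ha : pvSatisfied a.1 attributes = true
    · simp only [List.find?_cons, ha] at hfind
      have hr₀ : a = r₀ := Option.some.inj hfind
      have hzero : t.countP (fun r => pvSatisfied r.1 attributes) = 0 := by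
        rw [List.countP_cons] at hcount; simp only [ha] at hcount; rw [if_pos trivial] at hcount; omega
      simp only [List.foldl_cons]
      have hstep : pvStep' attributes ([], false) a = ([a.2], true) := by
        unfold pvStep'
        rw [ha]
        simp [PySem.Set.contains, PySem.Set.add]
      rw [hstep, hr₀]
      exact pv_no_fire attributes t _ (fun r h =>
        Or.inl (by simpa using (List.countP_eq_zero.1 hzero) r h))
    · simp only [List.find?_cons, (show pvSatisfied a.1 attributes = false by simpa using ha)] at hfind
      simp only [List.foldl_cons]
      have hstep : pvStep' attributes ([], false) a = ([], false) := by
        unfold pvStep'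
        rw [Bool.not_eq_true] at ha
        rw [ha]; simp
      rw [hstep]
      exact ih r₀ (by rw [List.countP_cons] at hcount; simp only [ha] at hcount; rw [if_neg (by simp)] at hcount; omega) hfind

theorem pv_scanB_find (attributes : List String) :
    ∀ rs : List (List String × String),
      pvScanB attributes rs =
        (match rs.find? (fun r => pvSatisfied r.1 attributes) with
         | some r => r.2
         | none => "unknown") := by
  intro rs
  induction rs with
  | nil => rfl
  | cons a t ih =>
    unfold pvScanB
    by_cases ha : pvSatisfied a.1 attributes = true
    · simp [ha]
    · simp [(show pvSatisfied a.1 attributes = false by simpa using ha), ih]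

theorem pv_loopA_succ (attributes : List String) (n : Nat) (inferred : PySem.Set String) :
    pvLoopA attributes (n + 1) inferred =
      (let st := pvRules.foldl (pvStepA attributes) (inferred, false)
       if st.2 then pvLoopA attributes n st.1 else st.1) := rfl


-- ===== VERDICT (by name: the statement is the Claim_ definition above) =====
theorem infer_animal_spec : Claim_equal_infer_animal := by
  intro attributes _ hpre
  unfold Pre_infer_animal at hpre
  unfold Spec_infer_animal infer_animal infer_animal_alt
  rw [pv_scanB_find]
  have hinter : ∀ c, PySem.Set.contains pvClassifications c = true →
      PySem.Set.inter [c] pvClassifications = [c] := by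
    intro c hc
    have hm : c ∈ pvClassifications := by simpa using hc
    simp [PySem.Set.inter, hm]
  cases hf : pvRules.find? (fun r => pvSatisfied r.1 attributes) with
  | none =>
    have hall : ∀ r ∈ pvRules, pvSatisfied r.1 attributes = false := by
      intro r hr
      simpa using List.find?_eq_none.1 hf r hr
    have hpass : pvRules.foldl (pvStepA attributes) (PySem.Set.empty, false) = ([], false) := by
      rw [pv_pass_eq attributes pvRules _ pvRules_ok (by simp [PySem.Set.empty])]
      exact pv_no_fire attributes pvRules _ (fun r hr => Or.inl (hall r hr))
    rw [show (8 : Nat) = 7 + 1 from rfl, pv_loopA_succ]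
    simp only [PySem.Set.empty] at hpass ⊢
    rw [hpass]
    simp [PySem.Set.inter]
  | some r₀ =>
    have hr₀ : r₀ ∈ pvRules := List.mem_of_find?_eq_some hf
    have hpass : pvRules.foldl (pvStepA attributes) (PySem.Set.empty, false) = ([r₀.2], true) := by
      rw [pv_pass_eq attributes pvRules _ pvRules_ok (by simp [PySem.Set.empty])]
      exact pv_one_fire attributes pvRules r₀ hpre hf
    have hpass2 : pvRules.foldl (pvStepA attributes) (([r₀.2] : PySem.Set String), false)
        = ([r₀.2], false) := by
      rw [pv_pass_eq attributes pvRules _ pvRules_ok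
        (by intro x hx; simp at hx; exact hx ▸ (pvRules_ok r₀ hr₀).2)]
      refine pv_no_fire attributes pvRules _ (fun r hr => ?_)
      by_cases hfi : pvSatisfied r.1 attributes = true
      · right
        rw [pv_find_unique attributes pvRules r₀ hpre hf r hr hfi]
        simp [PySem.Set.contains]
      · exact Or.inl (by simpa using hfi)
    rw [show (8 : Nat) = 7 + 1 from rfl, pv_loopA_succ]
    simp only [PySem.Set.empty] at hpass ⊢
    rw [hpass]
    rw [if_pos rfl, show (7 : Nat) = 6 + 1 from rfl, pv_loopA_succ, hpass2]
    rw [if_neg (by simp)]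
    rw [hinter r₀.2 (pvRules_cls r₀ hr₀)]
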